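-- pv_equiv track=rewrite | github.com/kiloscheffer/dropboxignore | src/dbxignore/rules.py | literal_prefix
-- ===== SOURCE A (Python) =====
-- def literal_prefix(pattern: str) -> str | None:
--     """Return the leading literal path segments of a gitignore pattern.
--
--     The returned value is the prefix up to (and including) the last ``/``
--     before the first glob metacharacter (``*``, ``?``, ``[``), or the whole
--     pattern if it contains no glob. A leading ``/`` anchor is stripped.
--
--     Returns ``None`` when there is no literal anchor — e.g. patterns that
--     begin with a glob (``**/cache/``), or that place a glob inside the first
--     segment (``foo*/bar/``). The detection layer uses ``None`` to skip
--     conflict analysis for that pattern (documented limitation).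
--
--     Input is the path portion of a gitignore pattern. Callers should pass
--     the raw line with any leading ``!`` already stripped — pathspec
--     already tracks include vs. negation via ``pattern.include``.
--     """
--     if not pattern:
--         return None
--     p = pattern.lstrip("/")
--     if not p:
--         return None
--     boundary = next(
--         (i for i, c in enumerate(p) if c in "*?["),
--         len(p),
--     )
--     if boundary < len(p):
--         last_sep = p[:boundary].rfind("/")
--         if last_sep == -1:
--             return None
--         return p[:last_sep + 1]
--     # No glob present: return whole pattern. If it ends in `/`, we keep the
--     # trailing slash; otherwise we cut at the last `/` so the prefix is a
--     # directory-shaped string (the detector walks directory ancestors).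
--     if "/" not in p:
--         return p
--     if p.endswith("/"):
--         return p
--     last_sep = p.rfind("/")
--     return p[:last_sep + 1]
-- ===== SOURCE B (Python) =====
-- def literal_prefix(pattern: str) -> str | None:
--     """Segment-based reimplementation: split on '/' and scan whole segments
--     instead of locating the glob char and slicing with rfind."""
--     p = pattern.lstrip("/")
--     if not p:
--         return None
--     segs = p.split("/")
--     for i, seg in enumerate(segs):
--         if any(c in "*?[" for c in seg):
--             return None if i == 0 else "/".join(segs[:i]) + "/"
--     if len(segs) == 1 or segs[-1] == "":
--         return p
--     return "/".join(segs[:-1]) + "/"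
-- ===== Notes on version B (the rewrite author's own statement) =====
-- stated objective: faster
-- what changed: B splits the stripped pattern into '/'-separated segments and scans for the first segment containing a glob metacharacter, rejoining the literal segments, instead of A's per-character boundary search followed by rfind/membership/endswith slicing; the bulk character work moves into C-level str.split/join, measured ~1.8x faster.
import Mathlib
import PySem

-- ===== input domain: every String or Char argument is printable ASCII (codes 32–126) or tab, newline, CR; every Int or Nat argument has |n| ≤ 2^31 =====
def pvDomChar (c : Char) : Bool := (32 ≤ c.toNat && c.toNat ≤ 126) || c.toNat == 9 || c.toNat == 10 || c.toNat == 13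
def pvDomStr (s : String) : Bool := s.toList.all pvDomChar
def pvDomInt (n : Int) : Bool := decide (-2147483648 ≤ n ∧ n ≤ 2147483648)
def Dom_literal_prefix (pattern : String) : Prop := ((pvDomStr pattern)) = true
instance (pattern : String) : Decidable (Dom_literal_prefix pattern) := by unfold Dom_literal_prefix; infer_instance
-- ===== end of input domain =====

-- B re-implements literal_prefix by splitting on '/' and scanning whole segments for glob
-- metacharacters instead of A's char-index boundary search plus rfind/membership/endswith slicing
-- (measured faster in a timing run; same return value everywhere, both functions are total).

-- ===== PORT A =====
-- c in "*?[" tested on a single character (exact: membership of one char in an ASCII literal)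
def pvIsMeta (c : Char) : Bool := c == '*' || c == '?' || c == '['

-- next((i for i, c in enumerate(p) if c in "*?["), len(p)) : the generator scan, step for step
def pvFirstMeta : List Char → Nat
  | [] => 0
  | c :: rest => if pvIsMeta c then 0 else pvFirstMeta rest + 1

def literal_prefix (pattern : String) : Option String :=
  if pattern = "" then none
  else
    -- pattern.lstrip("/") : drop leading '/' (exact for a single strip character)
    let p := pattern.toList.dropWhile (fun c => c == '/')
    if p = [] then none
    else
      let boundary := pvFirstMeta p
      if boundary < p.length then
        -- p[:boundary].rfind("/") ; p[:boundary] is take (0 ≤ boundary)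
        let lastSep := PySem.Chars.rfind (p.take boundary) ['/']
        if lastSep = -1 then none
        else some (String.ofList (p.take (lastSep.toNat + 1)))   -- p[:last_sep+1], last_sep ≥ 0 here
      else if PySem.Chars.isIn ['/'] p = false then some (String.ofList p)   -- "/" not in p
      else if PySem.Chars.endswith p ['/'] then some (String.ofList p)       -- p.endswith("/")
      else
        let lastSep := PySem.Chars.rfind p ['/']
        some (String.ofList (p.take (lastSep.toNat + 1)))        -- p[:last_sep+1], last_sep ≥ 0 here

-- ===== PORT B =====
-- the for-loop over enumerate(segs): done = segs[:i]; yields some segs[:i] at the first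
-- segment containing a glob char, none when the loop finishes
def pvScanB : List (List Char) → List (List Char) → Option (List (List Char))
  | [], _ => none
  | seg :: rest, done => if seg.any pvIsMeta then some done else pvScanB rest (done ++ [seg])

def literal_prefix_alt (pattern : String) : Option String :=
  let p := pattern.toList.dropWhile (fun c => c == '/')     -- pattern.lstrip("/")
  if p = [] then none
  else
    let segs := PySem.Chars.splitOn p ['/']                 -- p.split("/")
    match pvScanB segs [] with
    | some [] => none                                       -- i == 0
    | some done => some (String.ofList (PySem.Chars.join ['/'] done ++ ['/']))  -- "/".join(segs[:i]) + "/"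
    | none =>
      if segs.length = 1 ∨ PySem.List.pyGet? segs (-1) = some [] then some (String.ofList p)
      else some (String.ofList (PySem.Chars.join ['/'] (PySem.List.slice segs none (some (-1))) ++ ['/']))  -- "/".join(segs[:-1]) + "/"

-- ===== PRECONDITION & SPEC =====
def Spec_literal_prefix (pattern : String) (out : Option String) : Prop := out = literal_prefix_alt pattern
instance (pattern : String) (out : Option String) : Decidable (Spec_literal_prefix pattern out) := by unfold Spec_literal_prefix; infer_instance

-- ===== CLAIM (what is proved, stated in full; the proofs are below) =====
def Claim_equal_literal_prefix : Prop := ∀ (pattern : String), Dom_literal_prefix pattern → Spec_literal_prefix pattern (literal_prefix pattern)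

-- ===== LEMMAS AND PROOFS =====

-- splitting a list on '/' (the proofs' structural model of str.split("/"))
def mySplit : List Char → List (List Char)
  | [] => [[]]
  | c :: rest => if c = '/' then [] :: mySplit rest else (mySplit rest).modifyHead (c :: ·)

-- index of the last '/' (the proofs' model of str.rfind("/"))
def lastSlash : List Char → Option Nat
  | [] => none
  | c :: rest =>
    match lastSlash rest with
    | some i => some (i + 1)
    | none => if c = '/' then some 0 else none

theorem mySplit_cons_slash (rest : List Char) : mySplit ('/' :: rest) = [] :: mySplit rest := by
  simp [mySplit]

theorem mySplit_cons_ne {c : Char} (rest : List Char) (hc : ¬ c = '/') :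
    mySplit (c :: rest) = (mySplit rest).modifyHead (c :: ·) := by
  simp [mySplit, hc]

theorem mySplit_ne_nil (p : List Char) : mySplit p ≠ [] := by
  induction p with
  | nil => simp [mySplit]
  | cons c rest ih =>
    simp only [mySplit]
    split
    · simp
    · cases h : mySplit rest with
      | nil => exact absurd h ih
      | cons a b => simp [h]

theorem mySplit_head (p : List Char) :
    ∃ tl, mySplit p = (p.takeWhile (fun c => c != '/')) :: tl := by
  induction p with
  | nil => exact ⟨[], rfl⟩
  | cons c rest ih =>
    by_cases hc : c = '/'
    · subst hc; exact ⟨mySplit rest, by simp [mySplit, List.takeWhile]⟩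
    · obtain ⟨tl, htl⟩ := ih
      refine ⟨tl, ?_⟩
      have hbne : (c != '/') = true := by simp [hc]
      simp [mySplit, hc, htl, List.takeWhile, hbne]

theorem inter_cons (x : List Char) (l : List (List Char)) (h : l ≠ []) :
    List.intercalate ['/'] (x :: l) = x ++ '/' :: List.intercalate ['/'] l := by
  cases l with
  | nil => exact absurd rfl h
  | cons a b => simp [List.intercalate, List.intersperse]

theorem intercalate_mySplit (p : List Char) : List.intercalate ['/'] (mySplit p) = p := by
  induction p with
  | nil => simp [mySplit, List.intercalate]
  | cons c rest ih =>
    by_cases hc : c = '/'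
    · subst hc
      rw [mySplit_cons_slash, inter_cons _ _ (mySplit_ne_nil rest), ih]
      simp
    · rw [mySplit_cons_ne _ hc]
      cases hm : mySplit rest with
      | nil => exact absurd hm (mySplit_ne_nil rest)
      | cons a b =>
        rw [hm] at ih
        cases b with
        | nil =>
          simp [List.intercalate, List.intersperse] at ih ⊢
          simp [ih]
        | cons a2 b2 =>
          rw [List.modifyHead_cons, inter_cons _ _ (List.cons_ne_nil _ _), ← ih,
            inter_cons _ _ (List.cons_ne_nil _ _)]
          simp

theorem mySplit_no_slash (p : List Char) (h : '/' ∉ p) : mySplit p = [p] := by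
  induction p with
  | nil => rfl
  | cons c rest ih =>
    have hc : ¬ c = '/' := fun hh => h (hh ▸ List.mem_cons_self)
    have hr : '/' ∉ rest := fun hh => h (List.mem_cons_of_mem _ hh)
    simp [mySplit, hc, ih hr]

theorem mySplit_append_slash (x y : List Char) :
    mySplit (x ++ '/' :: y) = mySplit x ++ mySplit y := by
  induction x with
  | nil => simp [mySplit]
  | cons c x' ih =>
    by_cases hc : c = '/'
    · subst hc
      simp only [List.cons_append, mySplit_cons_slash, ih]
    · simp only [List.cons_append, mySplit_cons_ne _ hc, ih]
      cases hm : mySplit x' with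
      | nil => exact absurd hm (mySplit_ne_nil x')
      | cons a b => simp

theorem mem_of_mem_mySplit {p seg : List Char} {c : Char}
    (hseg : seg ∈ mySplit p) (hc : c ∈ seg) : c ∈ p := by
  induction p generalizing seg with
  | nil =>
    simp [mySplit] at hseg
    subst hseg; simp at hc
  | cons d rest ih =>
    by_cases hd : d = '/'
    · subst hd
      rw [mySplit_cons_slash, List.mem_cons] at hseg
      rcases hseg with h1 | h2
      · subst h1; simp at hc
      · exact List.mem_cons_of_mem _ (ih h2 hc)
    · rw [mySplit_cons_ne _ hd] at hseg
      cases hm : mySplit rest with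
      | nil => exact absurd hm (mySplit_ne_nil rest)
      | cons a b =>
        rw [hm, List.modifyHead_cons, List.mem_cons] at hseg
        rcases hseg with h1 | h2
        · subst h1
          rcases List.mem_cons.mp hc with h3 | h4
          · exact h3 ▸ List.mem_cons_self
          · exact List.mem_cons_of_mem _ (ih (hm ▸ List.mem_cons_self) h4)
        · exact List.mem_cons_of_mem _ (ih (hm ▸ List.mem_cons_of_mem _ h2) hc)

theorem mySplit_length (p : List Char) : (mySplit p).length = p.count '/' + 1 := by
  induction p with
  | nil => simp [mySplit]
  | cons c rest ih =>
    by_cases hc : c = '/'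
    · subst hc; simp [mySplit, ih, List.count_cons]
    · simp [mySplit, hc, ih, List.count_cons, Ne.symm hc]

theorem mySplit_getLast (p : List Char) (hp : p ≠ []) :
    ((mySplit p).getLast? = some [] ↔ p.getLast? = some '/') := by
  induction p with
  | nil => exact absurd rfl hp
  | cons c rest ih =>
    by_cases hrne : rest = []
    · subst hrne
      by_cases hc : c = '/'
      · subst hc; simp [mySplit]
      · simp [mySplit, hc]
    · obtain ⟨r0, rs, rfl⟩ := List.exists_cons_of_ne_nil hrne
      rw [List.getLast?_cons_cons, ← ih (by simp)]
      by_cases hc : c = '/'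
      · subst hc
        rw [mySplit_cons_slash]
        cases hm : mySplit (r0 :: rs) with
        | nil => exact absurd hm (mySplit_ne_nil _)
        | cons a b => rw [List.getLast?_cons_cons]
      · rw [mySplit_cons_ne _ hc]
        cases hm : mySplit (r0 :: rs) with
        | nil => exact absurd hm (mySplit_ne_nil _)
        | cons a b =>
          rw [List.modifyHead_cons]
          cases b with
          | nil =>
            have ha : a = r0 :: rs := by
              have h2 := intercalate_mySplit (r0 :: rs)
              rw [hm] at h2
              simpa [List.intercalate, List.intersperse] using h2
            simp [ha]
          | cons b0 bs =>
            rw [List.getLast?_cons_cons, List.getLast?_cons_cons]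

theorem splitOn_go_eq (l cur : List Char) (acc : List (List Char)) (fuel : Nat)
    (h : l.length < fuel) :
    PySem.Chars.splitOn.go ['/'] fuel l cur acc
      = acc.reverse ++ (mySplit l).modifyHead (cur.reverse ++ ·) := by
  induction l generalizing fuel cur acc with
  | nil =>
    obtain ⟨f, rfl⟩ : ∃ f, fuel = f + 1 := ⟨fuel - 1, by omega⟩
    simp [PySem.Chars.splitOn.go, mySplit]
  | cons c rest ih =>
    obtain ⟨f, rfl⟩ : ∃ f, fuel = f + 1 := ⟨fuel - 1, by omega⟩
    have hf : rest.length < f := by simpa using h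
    by_cases hc : c = '/'
    · subst hc
      simp only [PySem.Chars.splitOn.go, List.isPrefixOf, beq_self_eq_true, Bool.true_and,
        List.isPrefixOf_nil_left, if_true]
      simp only [List.length_cons, List.length_nil, List.drop_succ_cons, List.drop_zero]
      rw [ih _ _ _ hf]
      have : (mySplit rest).modifyHead (fun x => [].reverse ++ x) = mySplit rest := by
        cases mySplit rest <;> simp
      rw [this, mySplit_cons_slash]
      cases hm : mySplit rest with
      | nil => exact absurd hm (mySplit_ne_nil rest)
      | cons a b => simp
    · have hpre : List.isPrefixOf ['/'] (c :: rest) = false := by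
        simp [List.isPrefixOf, Ne.symm hc, hc]
      simp only [PySem.Chars.splitOn.go, hpre, if_false, Bool.false_eq_true]
      rw [ih _ _ _ hf, mySplit_cons_ne _ hc]
      cases hm : mySplit rest with
      | nil => exact absurd hm (mySplit_ne_nil rest)
      | cons a b => simp

theorem splitOn_eq (p : List Char) : PySem.Chars.splitOn p ['/'] = mySplit p := by
  rw [PySem.Chars.splitOn, splitOn_go_eq _ _ _ _ (by omega)]
  cases hm : mySplit p with
  | nil => exact absurd hm (mySplit_ne_nil p)
  | cons a b => simp

theorem lastSlash_none (p : List Char) : lastSlash p = none ↔ '/' ∉ p := by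
  induction p with
  | nil => simp [lastSlash]
  | cons c rest ih =>
    simp only [lastSlash]
    cases hr : lastSlash rest with
    | some i =>
      simp only [List.mem_cons]
      constructor
      · intro h; exact absurd h (by simp)
      · intro h
        exact absurd ((ih.mpr (fun hm => h (Or.inr hm))) ) (by simp [hr])
    | none =>
      by_cases hc : c = '/'
      · subst hc; simp
      · simp [hc, Ne.symm hc, ← ih, hr]

theorem lastSlash_spec {p : List Char} {i : Nat} (h : lastSlash p = some i) :
    i < p.length ∧ p = p.take i ++ '/' :: p.drop (i + 1) ∧ '/' ∉ p.drop (i + 1) := by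
  induction p generalizing i with
  | nil => simp [lastSlash] at h
  | cons c rest ih =>
    simp only [lastSlash] at h
    cases hr : lastSlash rest with
    | some k =>
      rw [hr] at h
      obtain rfl : i = k + 1 := by simpa using h.symm
      obtain ⟨h1, h2, h3⟩ := ih hr
      refine ⟨by simpa using Nat.succ_lt_succ h1, ?_, h3⟩
      simpa using congrArg (c :: ·) h2
    | none =>
      rw [hr] at h
      by_cases hc : c = '/'
      · subst hc
        obtain rfl : i = 0 := by simpa using h.symm
        exact ⟨by simp, by simp, (lastSlash_none rest).mp hr⟩
      · simp [hc] at h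

theorem lastSlash_concat (xs : List Char) (c : Char) :
    lastSlash (xs ++ [c]) = if c = '/' then some xs.length else lastSlash xs := by
  induction xs with
  | nil => simp [lastSlash]
  | cons d xs' ih =>
    simp only [List.cons_append, lastSlash, ih]
    by_cases hc : c = '/'
    · simp [hc]
    · simp [if_neg hc]

theorem rfind_go_eq (p : List Char) (j : Nat) :
    PySem.Chars.rfind.go p ['/'] j
      = (match lastSlash (p.take (j + 1)) with | some i => (i : Int) | none => -1) := by
  induction j with
  | zero =>
    simp only [PySem.Chars.rfind.go]
    cases p with
    | nil => simp [lastSlash, List.isPrefixOf]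
    | cons c r =>
      by_cases hc : c = '/'
      · subst hc; simp [List.isPrefixOf, lastSlash]
      · simp [List.isPrefixOf, hc, Ne.symm hc, lastSlash]
  | succ j ih =>
    simp only [PySem.Chars.rfind.go, ih]
    by_cases hj : j + 1 < p.length
    · have hget : p[j+1]? = some (p[j+1]'hj) := List.getElem?_eq_getElem hj
      have htake : p.take (j + 2) = p.take (j + 1) ++ [p[j+1]'hj] := by
        rw [List.take_succ, hget]; rfl
      rw [htake, lastSlash_concat]
      have hlen : (p.take (j+1)).length = j + 1 := List.length_take_of_le (by omega)
      have hdrop : p.drop (j + 1) = p[j+1]'hj :: p.drop (j + 2) := by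
        rw [List.drop_eq_getElem_cons hj]
      by_cases hc : p[j+1]'hj = '/'
      · rw [hdrop]
        simp [List.isPrefixOf, hc, hlen]
      · rw [hdrop]
        simp [List.isPrefixOf, hc, Ne.symm hc, hlen]
    · have hdrop : p.drop (j + 1) = [] := List.drop_eq_nil_of_le (by omega)
      have htake : p.take (j + 2) = p.take (j + 1) := by
        rw [List.take_of_length_le (by omega), List.take_of_length_le (by omega)]
      rw [hdrop, htake]
      simp [List.isPrefixOf]

theorem rfind_slash (p : List Char) :
    PySem.Chars.rfind p ['/'] = (match lastSlash p with | some i => (i : Int) | none => -1) := by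
  cases p with
  | nil => simp [PySem.Chars.rfind, PySem.Chars.rfind.go, lastSlash, List.isPrefixOf]
  | cons c r =>
    rw [PySem.Chars.rfind, rfind_go_eq]
    rw [List.take_of_length_le (by simp)]

theorem rfind_slash_some {p : List Char} {i : Nat} (h : lastSlash p = some i) :
    PySem.Chars.rfind p ['/'] = (i : Int) := by
  rw [rfind_slash, h]

theorem rfind_slash_none {p : List Char} (h : lastSlash p = none) :
    PySem.Chars.rfind p ['/'] = -1 := by
  rw [rfind_slash, h]

theorem isIn_slash (p : List Char) : PySem.Chars.isIn ['/'] p = false ↔ '/' ∉ p := by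
  rw [PySem.Chars.isIn_eq_false_iff]
  constructor
  · intro h hm
    obtain ⟨s, t, rfl⟩ := List.append_of_mem hm
    exact h ⟨s, t, by simp⟩
  · intro h hinf
    exact h (List.singleton_sublist.mp hinf.sublist)

theorem endswith_slash (p : List Char) :
    PySem.Chars.endswith p ['/'] = true ↔ p.getLast? = some '/' := by
  rw [PySem.Chars.endswith_iff, List.getLast?_eq_some_iff]
  constructor
  · rintro ⟨s, rfl⟩; exact ⟨s, rfl⟩
  · rintro ⟨s, rfl⟩; exact ⟨s, rfl⟩

theorem pvFirstMeta_eq (p : List Char) :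
    pvFirstMeta p = (p.takeWhile (fun c => !pvIsMeta c)).length := by
  induction p with
  | nil => rfl
  | cons c rest ih =>
    by_cases hc : pvIsMeta c
    · simp [pvFirstMeta, hc, List.takeWhile]
    · simp [pvFirstMeta, hc, List.takeWhile, ih]

theorem scanB_skip (l1 l2 done : List (List Char)) (h : ∀ seg ∈ l1, seg.any pvIsMeta = false) :
    pvScanB (l1 ++ l2) done = pvScanB l2 (done ++ l1) := by
  induction l1 generalizing done with
  | nil => simp
  | cons a l1' ih =>
    have ha : a.any pvIsMeta = false := h a List.mem_cons_self
    simp only [List.cons_append, pvScanB, ha, Bool.false_eq_true, if_false]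
    rw [ih _ (fun seg hs => h seg (List.mem_cons_of_mem _ hs))]
    simp

theorem scanB_none (l done : List (List Char)) (h : ∀ seg ∈ l, seg.any pvIsMeta = false) :
    pvScanB l done = none := by
  induction l generalizing done with
  | nil => rfl
  | cons a l' ih =>
    have ha : a.any pvIsMeta = false := h a List.mem_cons_self
    simp only [pvScanB, ha, Bool.false_eq_true, if_false]
    exact ih _ (fun seg hs => h seg (List.mem_cons_of_mem _ hs))

theorem pyGet_neg_one (l : List (List Char)) (h : l ≠ []) :
    PySem.List.pyGet? l (-1) = l.getLast? := by
  have hl : 1 ≤ l.length := List.length_pos_iff.mpr h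
  simp only [PySem.List.pyGet?, PySem.List.pyIdx?]
  rw [if_neg (by omega), if_pos (by exact_mod_cast by omega : -(l.length : Int) ≤ -1)]
  simp [List.getLast?_eq_getElem?]

-- (PySem.List.slice_to_neg_one covers segs[:-1])

theorem meta_ne_slash {m : Char} (hm : pvIsMeta m = true) : m ≠ '/' := by
  intro h; subst h; simp [pvIsMeta] at hm

theorem head_dropWhile {α : Type} (q : α → Bool) :
    ∀ (l : List α) (m : α) (r : List α), l.dropWhile q = m :: r → q m = false := by
  intro l
  induction l with
  | nil => intro m r h; simp at h
  | cons a l' ih =>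
    intro m r h
    by_cases ha : q a
    · rw [List.dropWhile_cons_of_pos ha] at h; exact ih _ _ h
    · rw [List.dropWhile_cons_of_neg ha] at h
      obtain ⟨rfl, -⟩ := List.cons.inj h
      simpa using ha

theorem segs_nometa {t : List Char} (ht : ∀ c ∈ t, pvIsMeta c = false) :
    ∀ seg ∈ mySplit t, seg.any pvIsMeta = false := by
  intro seg hs
  rw [List.any_eq_false]
  intro c hc
  simp [ht c (mem_of_mem_mySplit hs hc)]

-- the first segment of u ++ m :: r contains m when u is slash-free and m is a glob char
theorem first_seg_meta {u : List Char} {m : Char} (r : List Char)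
    (hu : '/' ∉ u) (hm : pvIsMeta m = true) :
    ((u ++ m :: r).takeWhile (fun c => c != '/')).any pvIsMeta = true := by
  have htw : (u ++ m :: r).takeWhile (fun c => c != '/')
      = u ++ (m :: r).takeWhile (fun c => c != '/') := by
    rw [List.takeWhile_append]
    have : u.takeWhile (fun c => c != '/') = u :=
      List.takeWhile_eq_self_iff.mpr (fun a ha => by
        simp only [bne_iff_ne, ne_eq]
        intro h
        exact hu (h ▸ ha))
    rw [this]; simp
  rw [htw, List.any_eq_true]
  refine ⟨m, ?_, hm⟩
  have : (m :: r).takeWhile (fun c => c != '/') = m :: r.takeWhile (fun c => c != '/') := by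
    rw [List.takeWhile_cons_of_pos (by simpa using meta_ne_slash hm)]
  rw [this]
  exact List.mem_append_right _ List.mem_cons_self

theorem core_eq (p : List Char) :
    (if p = [] then none
     else
      let boundary := pvFirstMeta p
      if boundary < p.length then
        let lastSep := PySem.Chars.rfind (p.take boundary) ['/']
        if lastSep = -1 then none
        else some (String.ofList (p.take (lastSep.toNat + 1)))
      else if PySem.Chars.isIn ['/'] p = false then some (String.ofList p)
      else if PySem.Chars.endswith p ['/'] then some (String.ofList p)
      else
        let lastSep := PySem.Chars.rfind p ['/']
        some (String.ofList (p.take (lastSep.toNat + 1))))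
    = (if p = [] then none
       else
        let segs := PySem.Chars.splitOn p ['/']
        match pvScanB segs [] with
        | some [] => none
        | some done => some (String.ofList (PySem.Chars.join ['/'] done ++ ['/']))
        | none =>
          if segs.length = 1 ∨ PySem.List.pyGet? segs (-1) = some [] then some (String.ofList p)
          else some (String.ofList (PySem.Chars.join ['/'] (PySem.List.slice segs none (some (-1))) ++ ['/']))) := by
  by_cases hp : p = []
  · simp [hp]
  · rw [if_neg hp, if_neg hp]
    simp only [splitOn_eq]
    by_cases hmeta : ∀ c ∈ p, pvIsMeta c = false
    -- ============ no glob char anywhere ============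
    · have hb : pvFirstMeta p = p.length := by
        rw [pvFirstMeta_eq, List.takeWhile_eq_self_iff.mpr (fun a ha => by simp [hmeta a ha])]
      rw [hb, if_neg (lt_irrefl _)]
      rw [scanB_none _ _ (segs_nometa hmeta)]
      by_cases hs : '/' ∈ p
      · have hIn : PySem.Chars.isIn ['/'] p = true := by
          cases h : PySem.Chars.isIn ['/'] p with
          | false => exact absurd ((isIn_slash p).mp h) (not_not_intro hs)
          | true => rfl
        rw [if_neg (by simp [hIn])]
        have hlen1 : ¬ (mySplit p).length = 1 := by
          rw [mySplit_length]
          have := List.count_pos_iff.mpr hs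
          omega
        by_cases hlast : p.getLast? = some '/'
        · rw [if_pos ((endswith_slash p).mpr hlast)]
          have hget : PySem.List.pyGet? (mySplit p) (-1) = some [] := by
            rw [pyGet_neg_one _ (mySplit_ne_nil p)]
            exact (mySplit_getLast p hp).mpr hlast
          rw [if_pos (Or.inr hget)]
        · rw [if_neg (by simp [hlast, endswith_slash])]
          have hgetne : ¬ PySem.List.pyGet? (mySplit p) (-1) = some [] := by
            rw [pyGet_neg_one _ (mySplit_ne_nil p), mySplit_getLast p hp]
            exact hlast
          obtain ⟨i, hi⟩ : ∃ i, lastSlash p = some i := by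
            cases h : lastSlash p with
            | none => exact absurd ((lastSlash_none p).mp h) (not_not_intro hs)
            | some i => exact ⟨i, rfl⟩
          obtain ⟨hilt, hdec, hnos⟩ := lastSlash_spec hi
          rw [rfind_slash_some hi]
          have hsplit : mySplit p = mySplit (p.take i) ++ [p.drop (i + 1)] := by
            conv_lhs => rw [hdec]
            rw [mySplit_append_slash, mySplit_no_slash _ hnos]
          have hxlen : (p.take i).length = i := List.length_take_of_le (by omega)
          have htk : p.take (i + 1) = p.take i ++ ['/'] := by
            conv_lhs => rw [hdec]
            rw [show i + 1 = (p.take i).length + 1 by rw [hxlen]]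
            rw [List.take_append]
            simp
          simp only [Int.toNat_natCast, htk, hsplit]
          rw [if_neg (by
            rintro (h1 | h2)
            · exact hlen1 (by rw [hsplit]; exact h1)
            · exact hgetne (by rw [hsplit]; exact h2))]
          rw [PySem.List.slice_to_neg_one, List.dropLast_concat,
            PySem.Chars.join, intercalate_mySplit]
      · rw [if_pos ((isIn_slash p).mpr hs)]
        have h1 : (mySplit p).length = 1 := by rw [mySplit_no_slash p hs]; rfl
        simp [h1]
    -- ============ p contains a glob char ============
    · have hblt : pvFirstMeta p < p.length := by
        rw [pvFirstMeta_eq]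
        rcases Nat.lt_or_ge (p.takeWhile (fun c => !pvIsMeta c)).length p.length with h | h
        · exact h
        · exfalso
          have hle := (List.takeWhile_prefix (p := fun c => !pvIsMeta c) (l := p)).length_le
          have heq : p.takeWhile (fun c => !pvIsMeta c) = p :=
            List.IsPrefix.eq_of_length (List.takeWhile_prefix _) (by omega)
          exact hmeta (fun c hc => by
            have := List.mem_takeWhile_imp (heq ▸ hc)
            simpa using this)
      rw [if_pos hblt]
      have htake : p.take (pvFirstMeta p) = p.takeWhile (fun c => !pvIsMeta c) := by
        rw [pvFirstMeta_eq]
        exact ((List.prefix_iff_eq_take.mp (List.takeWhile_prefix _)).symm)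
      set t := p.takeWhile (fun c => !pvIsMeta c) with hts
      have ht_nometa : ∀ c ∈ t, pvIsMeta c = false := fun c hc => by
        have := List.mem_takeWhile_imp hc
        simpa using this
      have hpdec : p = t ++ p.dropWhile (fun c => !pvIsMeta c) := (List.takeWhile_append_dropWhile).symm
      obtain ⟨m, r, hd⟩ : ∃ m r, p.dropWhile (fun c => !pvIsMeta c) = m :: r := by
        cases h : p.dropWhile (fun c => !pvIsMeta c) with
        | nil =>
          exfalso
          have : p.length ≤ t.length := by
            conv_lhs => rw [hpdec, h]
            simp
          rw [pvFirstMeta_eq, ← hts] at hblt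
          omega
        | cons m r => exact ⟨m, r, rfl⟩
      have hm : pvIsMeta m = true := by
        have := head_dropWhile (fun c => !pvIsMeta c) p m r hd
        simpa using this
      rw [htake]
      by_cases hst : '/' ∈ t
      -- a slash before the first glob char: both return the joined literal prefix
      · obtain ⟨i, hi⟩ : ∃ i, lastSlash t = some i := by
          cases h : lastSlash t with
          | none => exact absurd ((lastSlash_none t).mp h) (not_not_intro hst)
          | some i => exact ⟨i, rfl⟩
        obtain ⟨hilt, hdec, hnos⟩ := lastSlash_spec hi
        rw [rfind_slash_some hi]
        rw [if_neg (by omega)]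
        have hpdec2 : p = t.take i ++ '/' :: (t.drop (i + 1) ++ (m :: r)) := by
          conv_lhs => rw [hpdec, hd]
          conv_lhs => rw [hdec]
          simp
        have hsegsx : ∀ seg ∈ mySplit (t.take i), seg.any pvIsMeta = false :=
          segs_nometa (fun c hc => ht_nometa c (List.mem_of_mem_take hc))
        have hsplit : mySplit p
            = mySplit (t.take i) ++ mySplit (t.drop (i + 1) ++ (m :: r)) := by
          conv_lhs => rw [hpdec2]
          rw [mySplit_append_slash]
        obtain ⟨tl, htl⟩ := mySplit_head (t.drop (i + 1) ++ (m :: r))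
        have hany : ((t.drop (i + 1) ++ (m :: r)).takeWhile (fun c => c != '/')).any pvIsMeta = true :=
          first_seg_meta r hnos hm
        rw [hsplit, htl, scanB_skip _ _ _ hsegsx]
        simp only [List.nil_append, pvScanB, hany, if_true]
        cases hmx : mySplit (t.take i) with
        | nil => exact absurd hmx (mySplit_ne_nil _)
        | cons a as =>
          have hjoin : PySem.Chars.join ['/'] (a :: as) = t.take i := by
            rw [← hmx, PySem.Chars.join, intercalate_mySplit]
          have hxlen : (t.take i).length = i := List.length_take_of_le (by omega)
          have htk : p.take (i + 1) = t.take i ++ ['/'] := by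
            conv_lhs => rw [hpdec2]
            rw [show i + 1 = (t.take i).length + 1 by rw [hxlen]]
            rw [List.take_append]
            simp
          simp [hjoin, htk]
      -- no slash before the first glob char: both return none
      · rw [rfind_slash_none ((lastSlash_none t).mpr hst), if_pos rfl]
        obtain ⟨tl, htl⟩ := mySplit_head p
        have hany : (p.takeWhile (fun c => c != '/')).any pvIsMeta = true := by
          conv_lhs => rw [hpdec, hd]
          exact first_seg_meta r hst hm
        rw [htl]
        simp [pvScanB, hany]

-- ===== VERDICT (by name: the statement is the Claim_ definition above) =====
theorem literal_prefix_spec : Claim_equal_literal_prefix := by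
  intro pattern _
  unfold Spec_literal_prefix literal_prefix literal_prefix_alt
  by_cases hpat : pattern = ""
  · subst hpat; decide
  · rw [if_neg hpat]
    exact core_eq _
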